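-- pv_equiv track=rewrite | github.com/chasleslr/MITx-6.86x | Project 1/project1.py | bag_of_words
-- ===== SOURCE A (Python) =====
-- from string import punctuation, digits
--
-- def extract_words(input_string):
--     """
--     Helper function for bag_of_words()
--     Inputs a text string
--     Returns a list of lowercase words in the string.
--     Punctuation and digits are separated out into their own words.
--     """
--     for c in punctuation + digits:
--         input_string = input_string.replace(c, ' ' + c + ' ')
--
--     return input_string.lower().split()
--
-- def bag_of_words(texts, stopwords=None):
--     """
--     Args:
--         texts - a list of string reviews
--         stopwords - a list of words to remove from the bag or words.
--             null if no words are to be removed.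
--
--     Returns: A dictionary of unique unigrams occurring over the input
--
--     """
--     stopwords_list = stopwords if stopwords is not None else []
--     dictionary = {}  # maps word to unique index
--     for text in texts:
--         word_list = extract_words(text)
--         for word in word_list:
--             if word not in stopwords_list \
--                     and word not in dictionary:
--                 dictionary[word] = len(dictionary)
--     return dictionary
-- ===== SOURCE B (Python) =====
-- from string import punctuation, digits
--
-- def extract_words(input_string):
--     for c in punctuation + digits:
--         input_string = input_string.replace(c, ' ' + c + ' ')
--     return input_string.lower().split()
--
-- def bag_of_words(texts, stopwords=None):
--     # Position-based algorithm: record the first-occurrence position of every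
--     # word in the whole stream, then select non-stop words and sort them by
--     # that position; the rank in the sorted order is the index.
--     stop = stopwords if stopwords is not None else []
--     first = {}
--     pos = 0
--     for text in texts:
--         for word in extract_words(text):
--             if word not in first:
--                 first[word] = pos
--             pos += 1
--     kept = sorted(((p, w) for w, p in first.items() if w not in stop),
--                   key=lambda pw: pw[0])
--     return {w: i for i, (p, w) in enumerate(kept)}
-- ===== Notes on version B (the rewrite author's own statement) =====
-- stated objective: alternative
-- what changed: A assigns indices incrementally by testing each word against the growing output dict; B never consults the output while scanning: it records the first-occurrence position of every word in the whole word stream with a running counter, then selects non-stop words, sorts them by that position and ranks them with enumerate.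
import Mathlib
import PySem

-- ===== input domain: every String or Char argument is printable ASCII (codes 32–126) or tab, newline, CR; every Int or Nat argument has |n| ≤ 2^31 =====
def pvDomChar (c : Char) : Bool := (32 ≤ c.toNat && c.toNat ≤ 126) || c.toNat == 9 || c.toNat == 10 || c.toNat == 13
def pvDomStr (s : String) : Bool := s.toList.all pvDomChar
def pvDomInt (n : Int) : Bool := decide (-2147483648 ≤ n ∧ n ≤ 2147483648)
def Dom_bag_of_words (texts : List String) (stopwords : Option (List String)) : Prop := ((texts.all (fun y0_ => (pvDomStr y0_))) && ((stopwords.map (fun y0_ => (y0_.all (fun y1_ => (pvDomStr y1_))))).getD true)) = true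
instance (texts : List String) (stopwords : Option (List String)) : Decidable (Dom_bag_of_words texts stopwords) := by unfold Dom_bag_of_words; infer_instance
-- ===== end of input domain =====

-- B uses a different algorithm: it records the first-occurrence position of every word in the
-- whole word stream, then sorts the non-stop words by that position and ranks them, instead of
-- A's incremental membership-against-the-output dict; return values proved equal.
-- ===== PORT A =====
def pvPunctDigits : List Char := "!\"#$%&'()*+,-./:;<=>?@[\\]^_`{|}~0123456789".toList

def extract_words (input_string : String) : List String :=
  let s := pvPunctDigits.foldl
    (fun t c => PySem.Str.replace t (String.mk [c]) (String.mk [' ', c, ' '])) input_string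
  PySem.Str.split₀ (PySem.Str.lower s)

def bag_of_words (texts : List String) (stopwords : Option (List String)) : List (String × Int) :=
  let stopwords_list := stopwords.getD []
  let dictionary : PySem.Dict String Int :=
    texts.foldl (fun d text =>
      (extract_words text).foldl (fun d word =>
        if !(stopwords_list.contains word) && !(d.contains word)
        then d.insert word (d.size : Int) else d) d) PySem.Dict.empty
  dictionary.items

-- ===== PORT B =====
def bag_of_words_alt (texts : List String) (stopwords : Option (List String)) : List (String × Int) :=
  let stop := stopwords.getD []
  let st : PySem.Dict String Int × Int :=
    texts.foldl (fun s text =>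
      (extract_words text).foldl (fun s word =>
        ((if s.1.contains word then s.1 else s.1.insert word s.2), s.2 + 1)) s)
      (PySem.Dict.empty, 0)
  let kept := PySem.List.sorted
    ((st.1.items.filter (fun wp => !(stop.contains wp.1))).map (fun wp => (wp.2, wp.1)))
    (fun pw => pw.1) false
  (PySem.List.enumerate kept 0).map (fun p => (p.2.2, p.1))

-- ===== PRECONDITION & SPEC =====
def Spec_bag_of_words (texts : List String) (stopwords : Option (List String)) (out : List (String × Int)) : Prop := out = bag_of_words_alt texts stopwords
instance (texts : List String) (stopwords : Option (List String)) (out : List (String × Int)) : Decidable (Spec_bag_of_words texts stopwords out) := by unfold Spec_bag_of_words; infer_instance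

-- ===== CLAIM (what is proved, stated in full; the proofs are below) =====
def Claim_equal_bag_of_words : Prop := ∀ (texts : List String) (stopwords : Option (List String)), Dom_bag_of_words texts stopwords → Spec_bag_of_words texts stopwords (bag_of_words texts stopwords)

-- ===== LEMMAS AND PROOFS =====

-- keys of A's accumulator paired with indices i, i+1, ...
def enumDict (i : Int) : List String → List (String × Int)
  | [] => []
  | w :: ws => (w, i) :: enumDict (i + 1) ws

theorem enumDict_append (i : Int) (l : List String) (w : String) :
    enumDict i (l ++ [w]) = enumDict i l ++ [(w, i + l.length)] := by
  induction l generalizing i with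
  | nil => simp [enumDict]
  | cons a t ih => simp [enumDict, ih]; ring

theorem any_enumDict (i : Int) (l : List String) (w : String) :
    ((enumDict i l).any fun p => p.1 == w) = l.contains w := by
  induction l generalizing i with
  | nil => simp [enumDict]
  | cons a t ih =>
      simp only [enumDict, List.any_cons, ih]
      rw [Bool.eq_iff_iff]
      simp only [List.contains_cons, Bool.or_eq_true, beq_iff_eq, decide_eq_true_eq]
      constructor <;> rintro (h | h) <;> simp_all

theorem contains_enumDict (i : Int) (l : List String) (w : String) :
    (PySem.Dict.mk (enumDict i l)).contains w = l.contains w := by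
  rw [PySem.Dict.contains_mk, any_enumDict]

theorem size_enumDict (i : Int) (l : List String) :
    (PySem.Dict.mk (enumDict i l)).size = l.length := by
  induction l generalizing i with
  | nil => rfl
  | cons a t ih =>
      have h := ih (i + 1)
      simp only [enumDict, PySem.Dict.size] at *
      simpa using h

theorem foldl_step_items (stop : List String) (ws : List String) :
    ∀ (d : PySem.Dict String Int) (l : List String), d.items = enumDict 0 l →
    (ws.foldl (fun d word =>
        if !(stop.contains word) && !(d.contains word)
        then d.insert word (d.size : Int) else d) d).items
      = enumDict 0 (ws.foldl (fun l word =>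
          if !(stop.contains word) && !(l.contains word) then l ++ [word] else l) l) := by
  induction ws with
  | nil => intro d l h; simpa using h
  | cons w ws ih =>
      intro d l h
      have hd : d = PySem.Dict.mk (enumDict 0 l) := by
        cases d; simp [PySem.Dict.items] at h; simp [h]
      simp only [List.foldl_cons]
      by_cases hc : (!(stop.contains w) && !(l.contains w)) = true
      · have hcd : (!(stop.contains w) && !(d.contains w)) = true := by
          rw [hd, contains_enumDict]; exact hc
        rw [hc, hcd, if_pos rfl, if_pos rfl]
        apply ih
        have hnc : d.contains w = false := by
          rw [hd, contains_enumDict]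
          simp only [Bool.and_eq_true, Bool.not_eq_true'] at hc
          exact hc.2
        rw [PySem.Dict.items_insert_of_not_contains d _ hnc, h, hd, size_enumDict]
        rw [enumDict_append]; simp
      · have hcd : (!(stop.contains w) && !(d.contains w)) = false := by
          rw [hd, contains_enumDict]; simpa using hc
        simp only [eq_false_of_ne_true hc, hcd, Bool.false_eq_true, if_false]
        exact ih d l h

theorem contains_filter_of (p : String → Bool) (l : List String) (w : String)
    (h : p w = true) : (l.filter p).contains w = l.contains w := by
  rw [Bool.eq_iff_iff]
  simp [List.mem_filter, h]

theorem filter_foldl_add (stop : List String) (ws : List String) :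
    ∀ (l : List String),
    (ws.foldl (fun l word =>
        if !(stop.contains word) && !(l.contains word) then l ++ [word] else l)
      (l.filter (fun w => !(stop.contains w))))
      = (ws.foldl PySem.Set.add l).filter (fun w => !(stop.contains w)) := by
  induction ws with
  | nil => intro l; rfl
  | cons w ws ih =>
      intro l
      simp only [List.foldl_cons, PySem.Set.add]
      by_cases hs : stop.contains w = true
      · have hw : w ∈ stop := by simpa using hs
        have h1 : (!(stop.contains w) && !((l.filter (fun w => !(stop.contains w))).contains w)) = false := by
          simp [hw]
        simp only [h1, Bool.false_eq_true, if_false]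
        by_cases hl : PySem.Set.contains l w = true
        · simp only [hl, if_true]; exact ih l
        · simp only [eq_false_of_ne_true hl, Bool.false_eq_true, if_false]
          have := ih (l ++ [w])
          simp only [List.filter_append, List.filter_singleton, hs, Bool.not_true,
            cond_false, List.append_nil] at this
          exact this
      · have hw : w ∉ stop := by simpa using hs
        have hp : (!(stop.contains w)) = true := by simp [hw]
        have hcf : (l.filter (fun w => !(stop.contains w))).contains w = l.contains w :=
          contains_filter_of _ l w hp
        have hsl : PySem.Set.contains l w = l.contains w := by
          simp [PySem.Set.contains_eq_listContains]
        by_cases hl : l.contains w = true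
        · simp only [hp, hcf, hl, hsl, Bool.not_true, Bool.and_false, Bool.false_eq_true,
            if_false, if_true]
          exact ih l
        · have hl' := eq_false_of_ne_true hl
          simp only [hp, hcf, hl', hsl, Bool.not_false, Bool.and_true, if_true,
            Bool.false_eq_true, if_false]
          have := ih (l ++ [w])
          simp only [List.filter_append, List.filter_singleton, hp, cond_true] at this
          exact this

-- B's first-occurrence fold: key order, strictly increasing positions, final counter bound
theorem bfold_spec (ws : List String) :
    ∀ (d : PySem.Dict String Int) (p : Int),
    (d.items.map Prod.snd).Pairwise (· < ·) → (∀ q ∈ d.items.map Prod.snd, q < p) →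
    ((ws.foldl (fun s word =>
        ((if s.1.contains word then s.1 else s.1.insert word s.2), s.2 + 1)) (d, p)).1.items.map Prod.fst
        = ws.foldl PySem.Set.add (d.items.map Prod.fst))
    ∧ ((ws.foldl (fun s word =>
        ((if s.1.contains word then s.1 else s.1.insert word s.2), s.2 + 1)) (d, p)).1.items.map Prod.snd).Pairwise (· < ·) := by
  induction ws with
  | nil => intro d p h1 _; exact ⟨rfl, h1⟩
  | cons w ws ih =>
      intro d p h1 h2
      simp only [List.foldl_cons]
      have hck : d.contains w = (d.items.map Prod.fst).contains w := by
        obtain ⟨L⟩ := d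
        rw [PySem.Dict.contains_mk, Bool.eq_iff_iff]
        simp only [List.any_eq_true, List.contains_eq_any_beq, List.any_map, Function.comp, beq_iff_eq]
        constructor <;> rintro ⟨x, hx, he⟩ <;> exact ⟨x, hx, he.symm⟩
      by_cases hc : d.contains w = true
      · have hadd : PySem.Set.add (d.items.map Prod.fst) w = d.items.map Prod.fst := by
          simp only [PySem.Set.add, PySem.Set.contains_eq_listContains, ← hck, hc, if_true]
        simp only [hc, if_true]
        have := ih d (p + 1) h1 (fun q hq => lt_trans (h2 q hq) (by omega))
        rwa [hadd]
      · have hc' := eq_false_of_ne_true hc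
        simp only [hc', Bool.false_eq_true, if_false]
        have hins := PySem.Dict.items_insert_of_not_contains d (v := p) hc'
        have hmapf : (d.insert w p).items.map Prod.fst = PySem.Set.add (d.items.map Prod.fst) w := by
          rw [hins, PySem.Set.add, PySem.Set.contains_eq_listContains, ← hck, hc']
          simp
        have hmaps : ((d.insert w p).items.map Prod.snd) = d.items.map Prod.snd ++ [p] := by
          rw [hins]; simp
        have hp1 : (((d.insert w p).items.map Prod.snd)).Pairwise (· < ·) := by
          rw [hmaps, List.pairwise_append]
          exact ⟨h1, by simp, by intro a ha b hb; simp at hb; subst hb; exact h2 a ha⟩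
        have hp2 : ∀ q ∈ (d.insert w p).items.map Prod.snd, q < p + 1 := by
          intro q hq
          rw [hmaps] at hq
          rcases List.mem_append.mp hq with h | h
          · exact lt_trans (h2 q h) (by omega)
          · simp at h; omega
        have := ih (d.insert w p) (p + 1) hp1 hp2
        rw [hmapf] at this
        exact this

theorem enumerate_map_swap (l : List (Int × String)) : ∀ (i : Int),
    (PySem.List.enumerate l i).map (fun p => (p.2.2, p.1)) = enumDict i (l.map Prod.snd) := by
  induction l with
  | nil => intro i; simp [enumDict, PySem.List.enumerate_nil]
  | cons a t ih => intro i; simp [enumDict, PySem.List.enumerate_cons, ih]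

-- ===== VERDICT (by name: the statement is the Claim_ definition above) =====
theorem bag_of_words_spec : Claim_equal_bag_of_words := by
  intro texts stopwords _
  unfold Spec_bag_of_words
  show (bag_of_words texts stopwords) = _
  unfold bag_of_words bag_of_words_alt
  simp only [← List.foldl_flatMap]
  set stop := stopwords.getD [] with hstop
  set ws := texts.flatMap extract_words with hws
  -- A side
  rw [foldl_step_items stop ws PySem.Dict.empty [] rfl]
  have h1 := filter_foldl_add stop ws []
  simp only [List.filter_nil] at h1
  rw [h1]
  -- B side
  have hb := bfold_spec ws PySem.Dict.empty 0 (by simp [PySem.Dict.empty, PySem.Dict.items]) (by simp [PySem.Dict.empty, PySem.Dict.items])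
  set st := ws.foldl (fun s word =>
      ((if s.1.contains word then s.1 else s.1.insert word s.2), s.2 + 1))
    ((PySem.Dict.empty : PySem.Dict String Int), (0 : Int)) with hst
  obtain ⟨hkeys, hpair⟩ := hb
  simp only [PySem.Dict.empty, PySem.Dict.items, List.map_nil] at hkeys
  -- the filtered, swapped item list is strictly increasing in its first component
  have hpairitems : (st.1.items).Pairwise (fun a b => a.2 < b.2) := (List.pairwise_map).mp hpair
  have hpairfilt : ((st.1.items.filter (fun wp => !(stop.contains wp.1)))).Pairwise (fun a b => a.2 < b.2) :=
    hpairitems.filter _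
  have hpairswap : (((st.1.items.filter (fun wp => !(stop.contains wp.1))).map (fun wp => (wp.2, wp.1)))).Pairwise
      (fun a b => (fun pw : Int × String => pw.1) a ≤ (fun pw : Int × String => pw.1) b) := by
    rw [List.pairwise_map]
    exact hpairfilt.imp (fun h => le_of_lt h)
  rw [PySem.List.sorted_eq_self_of_pairwise _ _ hpairswap]
  rw [enumerate_map_swap]
  -- the word lists coincide
  have : ((st.1.items.filter (fun wp => !(stop.contains wp.1))).map (fun wp => (wp.2, wp.1))).map Prod.snd
      = (ws.foldl PySem.Set.add []).filter (fun w => !(stop.contains w)) := by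
    rw [List.map_map]
    have : (Prod.snd ∘ fun wp : String × Int => (wp.2, wp.1)) = Prod.fst := rfl
    rw [this, ← hkeys, List.filter_map]
    rfl
  rw [this]
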